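-- pv_equiv track=rewrite | github.com/AliRadwan9/spreadsheet-web-app | spreadsheet/spreadsheet.py | update_cell
-- ===== SOURCE A (Python) =====
-- def update_cell(data, row_idx, col_idx, new_value):
--     new_data = []
--     for i in range(len(data)):
--         current_row = list(data[i])
--         if i == row_idx and 0 <= col_idx < len(current_row):
--             current_row[col_idx] = new_value
--         new_data.append(current_row)
--     return new_data
-- ===== SOURCE B (Python) =====
-- def update_cell(data, row_idx, col_idx, new_value):
--     if 0 <= row_idx < len(data):
--         row = data[row_idx]
--         if 0 <= col_idx < len(row):
--             new_row = row[:col_idx] + [new_value] + row[col_idx + 1:]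
--             return [list(r) for r in data[:row_idx]] + [new_row] \
--                  + [list(r) for r in data[row_idx + 1:]]
--     return [list(r) for r in data]
-- ===== Notes on version B (the rewrite author's own statement) =====
-- stated objective: alternative
-- what changed: B splices by slicing instead of iterating with a per-index test: it rebuilds the target row as row[:c] + [new_value] + row[c+1:] and the grid as data[:r] + [new_row] + data[r+1:], with an early full-copy return when the indices are out of range, rather than A's index loop that compares i == row_idx on every iteration.
import Mathlib
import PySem

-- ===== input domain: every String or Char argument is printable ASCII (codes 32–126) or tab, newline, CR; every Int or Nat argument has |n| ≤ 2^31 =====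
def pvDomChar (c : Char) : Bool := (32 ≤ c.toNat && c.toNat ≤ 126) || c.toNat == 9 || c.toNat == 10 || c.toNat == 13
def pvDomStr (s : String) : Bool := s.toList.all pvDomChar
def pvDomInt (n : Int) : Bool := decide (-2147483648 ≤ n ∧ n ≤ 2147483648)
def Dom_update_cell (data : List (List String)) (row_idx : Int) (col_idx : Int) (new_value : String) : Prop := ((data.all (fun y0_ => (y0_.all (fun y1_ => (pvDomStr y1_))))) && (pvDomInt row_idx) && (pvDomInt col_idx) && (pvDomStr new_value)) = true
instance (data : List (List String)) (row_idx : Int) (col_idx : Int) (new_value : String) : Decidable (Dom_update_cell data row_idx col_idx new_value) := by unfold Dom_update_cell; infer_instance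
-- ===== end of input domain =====

-- B rebuilds the result by slicing and concatenation (data[:r] + [row[:c] + [v] + row[c+1:]] + data[r+1:], or a plain full copy when out of range) instead of A's index loop with a per-iteration i == row_idx test (objective: alternative).


-- ===== PORT A =====
-- transliteration of A: for i in range(len(data)): copy row i; conditionally set; append
def update_cell (data : List (List String)) (row_idx : Int) (col_idx : Int) (new_value : String) : List (List String) :=
  (PySem.List.pyRange 0 (data.length : Int) 1).foldl
    (fun new_data i =>
      let current_row := PySem.List.pyGetD data i []
      let current_row :=
        if i = row_idx ∧ 0 ≤ col_idx ∧ col_idx < (current_row.length : Int) then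
          PySem.List.pySetD current_row col_idx new_value
        else current_row
      new_data ++ [current_row]) []

-- ===== PORT B =====
-- B: guarded slice-splice; data[row_idx] inside the guard is in range, ported as pyGetD
def update_cell_alt (data : List (List String)) (row_idx : Int) (col_idx : Int) (new_value : String) : List (List String) :=
  if 0 ≤ row_idx ∧ row_idx < (data.length : Int) then
    let row := PySem.List.pyGetD data row_idx []
    if 0 ≤ col_idx ∧ col_idx < (row.length : Int) then
      let new_row := PySem.List.slice row none (some col_idx) ++ [new_value] ++
                     PySem.List.slice row (some (col_idx + 1)) none
      (PySem.List.slice data none (some row_idx)).map (fun r => r) ++ [new_row] ++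
      (PySem.List.slice data (some (row_idx + 1)) none).map (fun r => r)
    else data.map (fun r => r)
  else data.map (fun r => r)

-- ===== PRECONDITION & SPEC =====
def Spec_update_cell (data : List (List String)) (row_idx : Int) (col_idx : Int) (new_value : String) (out : List (List String)) : Prop := out = update_cell_alt data row_idx col_idx new_value
instance (data : List (List String)) (row_idx : Int) (col_idx : Int) (new_value : String) (out : List (List String)) : Decidable (Spec_update_cell data row_idx col_idx new_value out) := by unfold Spec_update_cell; infer_instance

-- ===== CLAIM =====
def Claim_equal_update_cell : Prop := ∀ (data : List (List String)) (row_idx : Int) (col_idx : Int) (new_value : String), Dom_update_cell data row_idx col_idx new_value → Spec_update_cell data row_idx col_idx new_value (update_cell data row_idx col_idx new_value)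

-- ===== LEMMAS AND PROOFS =====
theorem update_cell_A_as_map (data : List (List String)) (r c : Int) (v : String) :
    update_cell data r c v = (List.range data.length).map (fun (k : Nat) =>
      if (k : Int) = r ∧ 0 ≤ c ∧ c < ((data.getD k []).length : Int) then
        PySem.List.pySetD (data.getD k []) c v
      else data.getD k []) := by
  show List.foldl (fun nd (i : Int) => nd ++
      [if i = r ∧ 0 ≤ c ∧ c < ((PySem.List.pyGetD data i []).length : Int) then
          PySem.List.pySetD (PySem.List.pyGetD data i []) c v
        else PySem.List.pyGetD data i []]) []
      (PySem.List.pyRange 0 (data.length : Int) 1) = _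
  rw [PySem.List.foldl_append_singleton_eq_map, PySem.List.pyRange_zero_natCast, List.map_map]
  simp [Function.comp_def, PySem.List.pyGetD_natCast]

theorem update_cell_B_as_set (data : List (List String)) (r c : Int) (v : String)
    (hr0 : 0 ≤ r) (hrn : r < (data.length : Int))
    (hc0 : 0 ≤ c) (hcn : c < ((PySem.List.pyGetD data r []).length : Int)) :
    update_cell_alt data r c v =
      data.set r.toNat ((PySem.List.pyGetD data r []).set c.toNat v) := by
  unfold update_cell_alt
  rw [if_pos ⟨hr0, hrn⟩, if_pos ⟨hc0, hcn⟩]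
  set row := PySem.List.pyGetD data r [] with hrow
  have hrL : r.toNat < data.length := by omega
  have hcL : c.toNat < row.length := by omega
  rw [PySem.List.slice_to _ hr0, PySem.List.slice_from _ (by omega : (0:Int) ≤ r + 1),
      PySem.List.slice_to _ hc0, PySem.List.slice_from _ (by omega : (0:Int) ≤ c + 1),
      List.map_id', List.map_id',
      List.set_eq_take_append_cons_drop, if_pos hrL,
      List.set_eq_take_append_cons_drop, if_pos hcL]
  have h1 : (r + 1).toNat = r.toNat + 1 := by omega
  have h2 : (c + 1).toNat = c.toNat + 1 := by omega
  rw [h1, h2]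
  simp

-- ===== VERDICT =====
theorem update_cell_spec : Claim_equal_update_cell := by
  intro data r c v _
  unfold Spec_update_cell
  rw [update_cell_A_as_map]
  by_cases h : 0 ≤ r ∧ r < (data.length : Int) ∧ 0 ≤ c ∧ c < ((PySem.List.pyGetD data r []).length : Int)
  · obtain ⟨hr0, hrn, hc0, hcn⟩ := h
    rw [update_cell_B_as_set data r c v hr0 hrn hc0 hcn]
    have hget : PySem.List.pyGetD data r [] = data[r.toNat]'(by omega) :=
      PySem.List.pyGetD_eq_getElem data [] hr0 hrn
    rw [hget] at hcn ⊢
    apply List.ext_getElem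
    · simp
    · intro k hk hk'
      have hkn : k < data.length := by simpa using hk
      simp only [List.getElem_map, List.getElem_range, List.getElem_set]
      rw [List.getD_eq_getElem _ _ hkn]
      split_ifs with h1 h2 h2
      · subst h2
        rw [PySem.List.pySetD_of_nonneg _ _ hc0]
      · exact absurd (by omega : r.toNat = k) h2
      · subst h2
        exact absurd ⟨by omega, hc0, hcn⟩ h1
      · rfl
  · have hB : update_cell_alt data r c v = data.map (fun x => x) := by
      unfold update_cell_alt
      by_cases hr : 0 ≤ r ∧ r < (data.length : Int)
      · rw [if_pos hr, if_neg (fun hc => h ⟨hr.1, hr.2, hc.1, hc.2⟩)]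
      · rw [if_neg hr]
    rw [hB, List.map_id']
    apply List.ext_getElem
    · simp
    · intro k hk hk'
      have hkn : k < data.length := by simpa using hk
      simp only [List.getElem_map, List.getElem_range]
      rw [if_neg, List.getD_eq_getElem _ _ hkn]
      rintro ⟨h1, h2, h3⟩
      refine h ⟨by omega, by omega, h2, ?_⟩
      have hpg : PySem.List.pyGetD data r [] = data.getD k [] := by
        rw [← h1, PySem.List.pyGetD_natCast]
      rw [hpg]; exact h3
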